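-- pv_equiv track=rewrite | github.com/KubinGH/logia-tryhard-saga | Ye Olde/Etap 2/2014/2.py | poler
-- ===== SOURCE A (Python) =====
-- def poler(path):
--     dirs = {"g": [0, 1], "d": [0, -1],
--             "p": [1, 0], "l": [-1, 0]}
--
--     pos = [0, 0]
--     max_pos = {k: 0 for k in "gdpl"}
--
--     for cdir in path:
--         pos = [p + d for p, d in zip(pos, dirs[cdir])]
--         max_pos["g"] = max(max_pos["g"], pos[1])
--         max_pos["d"] = min(max_pos["d"], pos[1])
--         max_pos["p"] = max(max_pos["p"], pos[0])
--         max_pos["l"] = min(max_pos["l"], pos[0])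
--
--     return (max_pos["g"] - max_pos["d"]) * (max_pos["p"] - max_pos["l"])
-- ===== SOURCE B (Python) =====
-- def poler(path):
--     dirs = {"g": (0, 1), "d": (0, -1),
--             "p": (1, 0), "l": (-1, 0)}
--     steps = [dirs[c] for c in path]
--
--     def summarize(a):
--         # (total, max prefix sum, min prefix sum) of a; prefixes include the empty one.
--         # Divide and conquer with the associative combine used in segment trees.
--         if not a:
--             return (0, 0, 0)
--         if len(a) == 1:
--             v = a[0]
--             return (v, max(0, v), min(0, v))
--         mid = len(a) // 2
--         tl, Ml, ml = summarize(a[:mid])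
--         tr, Mr, mr = summarize(a[mid:])
--         return (tl + tr, max(Ml, tl + Mr), min(ml, tl + mr))
--
--     _, My, my = summarize([s[1] for s in steps])
--     _, Mx, mx = summarize([s[0] for s in steps])
--     return (My - my) * (Mx - mx)
-- ===== Notes on version B (the rewrite author's own statement) =====
-- stated objective: alternative
-- what changed: Replaces the sequential walk simulation tracking four running extrema with a divide-and-conquer reduction: the path is turned into x/y step sequences and a segment-tree-style associative combine (total, max-prefix-sum, min-prefix-sum) is computed recursively on halves; the spans of prefix sums give the bounding box.
import Mathlib
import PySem

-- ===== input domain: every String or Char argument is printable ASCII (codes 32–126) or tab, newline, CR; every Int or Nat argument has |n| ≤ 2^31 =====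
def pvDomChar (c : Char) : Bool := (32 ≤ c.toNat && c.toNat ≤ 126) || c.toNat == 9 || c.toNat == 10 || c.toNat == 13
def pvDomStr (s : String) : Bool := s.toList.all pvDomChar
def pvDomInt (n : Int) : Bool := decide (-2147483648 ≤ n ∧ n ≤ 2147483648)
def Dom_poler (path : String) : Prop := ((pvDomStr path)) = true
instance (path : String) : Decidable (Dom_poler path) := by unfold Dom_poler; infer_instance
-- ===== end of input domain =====

-- B replaces A's sequential walk simulation (four running extrema) with a
-- divide-and-conquer reduction of the x/y step lists by the associative combine
-- (total, max prefix sum, min prefix sum); same results, different algorithm.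

-- ===== PORT A =====
-- the dirs dict of A; both Pythons raise KeyError outside "gdpl" (excluded by Pre_),
-- here the lookup totalises with (0,0), a value the ports never use inside Pre_
def polerDirA (c : Char) : Int × Int :=
  if c = 'g' then (0, 1) else if c = 'd' then (0, -1)
  else if c = 'p' then (1, 0) else if c = 'l' then (-1, 0) else (0, 0)

def poler (path : String) : Int :=
  let st := path.toList.foldl
    (fun (st : (Int × Int) × Int × Int × Int × Int) c =>
      let pos := (st.1.1 + (polerDirA c).1, st.1.2 + (polerDirA c).2)
      (pos, max st.2.1 pos.2, min st.2.2.1 pos.2, max st.2.2.2.1 pos.1, min st.2.2.2.2 pos.1))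
    ((0, 0), 0, 0, 0, 0)
  (st.2.1 - st.2.2.1) * (st.2.2.2.1 - st.2.2.2.2)

-- ===== PORT B =====
-- B's dirs dict, totalised identically (unused outside "gdpl" inside Pre_)
def polerDirB (c : Char) : Int × Int :=
  if c = 'g' then (0, 1) else if c = 'd' then (0, -1)
  else if c = 'p' then (1, 0) else if c = 'l' then (-1, 0) else (0, 0)

-- Source B's 'summarize': divide and conquer on halves, segment-tree combine
def polerSum3 : List Int → Int × Int × Int
  | [] => (0, 0, 0)
  | [v] => (v, max 0 v, min 0 v)
  | x :: y :: t =>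
      let mid := (x :: y :: t).length / 2
      let l := polerSum3 ((x :: y :: t).take mid)
      let r := polerSum3 ((x :: y :: t).drop mid)
      (l.1 + r.1, max l.2.1 (l.1 + r.2.1), min l.2.2 (l.1 + r.2.2))
termination_by a => a.length
decreasing_by
  · simp; omega
  · simp; omega

def poler_alt (path : String) : Int :=
  let steps := path.toList.map polerDirB
  let sy := polerSum3 (steps.map (·.2))
  let sx := polerSum3 (steps.map (·.1))
  (sy.2.1 - sy.2.2) * (sx.2.1 - sx.2.2)

-- ===== PRECONDITION & SPEC =====
-- Pre_ excludes exactly the paths containing a character outside "gdpl": there both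
-- Python A and Python B raise KeyError on the dict lookup.
def Pre_poler (path : String) : Prop :=
  (path.toList.all (fun c => c == 'g' || c == 'd' || c == 'p' || c == 'l')) = true
instance (path : String) : Decidable (Pre_poler path) := by unfold Pre_poler; infer_instance

def pvWitness_poler : String := "gdpl"

def Spec_poler (path : String) (out : Int) : Prop := out = poler_alt path
instance (path : String) (out : Int) : Decidable (Spec_poler path out) := by unfold Spec_poler; infer_instance

-- ===== CLAIM (what is proved, stated in full; the proofs are below) =====
def Claim_equal_poler : Prop := ∀ (path : String), Dom_poler path → Pre_poler path → Spec_poler path (poler path)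

-- ===== LEMMAS AND PROOFS =====

-- spec functions: max/min prefix sum (including the empty prefix) of a step list
def pmaxP : List Int → Int
  | [] => 0
  | v :: t => max 0 (v + pmaxP t)

def pminP : List Int → Int
  | [] => 0
  | v :: t => min 0 (v + pminP t)

theorem pmaxP_nonneg (a : List Int) : 0 ≤ pmaxP a := by
  cases a with
  | nil => simp [pmaxP]
  | cons v t => simp [pmaxP]

theorem pminP_nonpos (a : List Int) : pminP a ≤ 0 := by
  cases a with
  | nil => simp [pminP]
  | cons v t => simp [pminP]

theorem pmaxP_append (a b : List Int) :
    pmaxP (a ++ b) = max (pmaxP a) (a.sum + pmaxP b) := by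
  induction a with
  | nil => have := pmaxP_nonneg b; simp [pmaxP]; omega
  | cons v t ih => simp [pmaxP, ih]; omega

theorem pminP_append (a b : List Int) :
    pminP (a ++ b) = min (pminP a) (a.sum + pminP b) := by
  induction a with
  | nil => have := pminP_nonpos b; simp [pminP]; omega
  | cons v t ih => simp [pminP, ih]; omega

-- divide-and-conquer summary computes (sum, max prefix, min prefix)
theorem polerSum3_eq (a : List Int) : polerSum3 a = (a.sum, pmaxP a, pminP a) := by
  fun_induction polerSum3 a with
  | case1 => simp [pmaxP, pminP]
  | case2 v => simp [pmaxP, pminP]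
  | case3 x y t mid l r =>
      rename_i ihtake ihdrop
      have hl : l = polerSum3 ((x :: y :: t).take mid) := rfl
      have hr : r = polerSum3 ((x :: y :: t).drop mid) := rfl
      have hmid : mid = (x :: y :: t).length / 2 := rfl
      rw [hl, hr]
      rw [hmid] at ihtake ihdrop ⊢
      have hsplit : (x :: y :: t).take ((x :: y :: t).length / 2) ++
          (x :: y :: t).drop ((x :: y :: t).length / 2) = x :: y :: t :=
        List.take_append_drop _ _
      have hs := congrArg List.sum hsplit
      have hM := pmaxP_append ((x :: y :: t).take ((x :: y :: t).length / 2))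
        ((x :: y :: t).drop ((x :: y :: t).length / 2))
      have hm := pminP_append ((x :: y :: t).take ((x :: y :: t).length / 2))
        ((x :: y :: t).drop ((x :: y :: t).length / 2))
      rw [hsplit] at hM hm
      simp only [List.sum_append] at hs
      simp only [List.length_cons, List.sum_cons] at ihtake ihdrop hs hM hm ⊢
      rw [ihtake, ihdrop, hM, hm]
      simp only [Prod.mk.injEq, and_true]
      omega

-- loop invariant for A's fold: the running extrema absorb the prefix-sum extrema
-- of the remaining steps, provided the extrema already cover the current position
theorem poler_fold_inv (cs : List Char) (x y My my Mx mx : Int)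
    (hMy : y ≤ My) (hmy : my ≤ y) (hMx : x ≤ Mx) (hmx : mx ≤ x) :
    (cs.foldl
      (fun (st : (Int × Int) × Int × Int × Int × Int) c =>
        let pos := (st.1.1 + (polerDirA c).1, st.1.2 + (polerDirA c).2)
        (pos, max st.2.1 pos.2, min st.2.2.1 pos.2, max st.2.2.2.1 pos.1, min st.2.2.2.2 pos.1))
      ((x, y), My, my, Mx, mx))
    = ((x + (cs.map (fun c => (polerDirA c).1)).sum,
        y + (cs.map (fun c => (polerDirA c).2)).sum),
       max My (y + pmaxP (cs.map (fun c => (polerDirA c).2))),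
       min my (y + pminP (cs.map (fun c => (polerDirA c).2))),
       max Mx (x + pmaxP (cs.map (fun c => (polerDirA c).1))),
       min mx (x + pminP (cs.map (fun c => (polerDirA c).1)))) := by
  induction cs generalizing x y My my Mx mx with
  | nil => simp [pmaxP, pminP]; omega
  | cons c cs ih =>
      have hMy' := pmaxP_nonneg (cs.map (fun c => (polerDirA c).2))
      have hmy' := pminP_nonpos (cs.map (fun c => (polerDirA c).2))
      have hMx' := pmaxP_nonneg (cs.map (fun c => (polerDirA c).1))
      have hmx' := pminP_nonpos (cs.map (fun c => (polerDirA c).1))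
      simp only [List.foldl_cons, List.map_cons, List.sum_cons]
      rw [ih (x + (polerDirA c).1) (y + (polerDirA c).2)
            (max My (y + (polerDirA c).2)) (min my (y + (polerDirA c).2))
            (max Mx (x + (polerDirA c).1)) (min mx (x + (polerDirA c).1))
            (le_max_right _ _) (min_le_right _ _) (le_max_right _ _) (min_le_right _ _)]
      simp [pmaxP, pminP]
      refine ⟨⟨by ring, by ring⟩, by omega, by omega, by omega, by omega⟩

-- ===== VERDICT (by name: the statement is the Claim_ definition above) =====
theorem poler_spec : Claim_equal_poler := by
  intro path _ _
  unfold Spec_poler poler poler_alt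
  rw [poler_fold_inv path.toList 0 0 0 0 0 0 le_rfl le_rfl le_rfl le_rfl]
  have hAB : polerDirA = polerDirB := rfl
  simp [polerSum3_eq, List.map_map, Function.comp_def, hAB,
        pmaxP_nonneg, pminP_nonpos]
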